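-- pv_equiv track=rewrite | github.com/ZhangSteven/stutility | itermd.py | skipn
-- ===== SOURCE A (Python) =====
-- def skipn(n, L):
--     """
--     [Int] n (>=0), [Iterable] L => [Iterable] L1
--
--     Whwere L1 is L after skipping the first n elements
--     """
--     if isinstance(n, int) and n > -1:
--         for idx, el in enumerate(L):
--             if idx < n:
--                 continue
--             else:
--                 yield el
--
--     else:
--         raise ValueError(f'invalid argument: n={n}')
-- ===== SOURCE B (Python) =====
-- def skipn(n, L):
--     """
--     [Int] n (>=0), [Iterable] L => [Iterable] L1
--
--     Where L1 is L after skipping the first n elements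
--     """
--     if isinstance(n, int) and n > -1:
--         it = iter(L)
--         sentinel = object()
--         for _ in range(n):
--             if next(it, sentinel) is sentinel:
--                 return
--         yield from it
--     else:
--         raise ValueError(f'invalid argument: n={n}')
-- ===== Notes on version B (the rewrite author's own statement) =====
-- stated objective: alternative
-- what changed: Replaces A's single enumerate loop with a per-element index comparison by two phases: first consume exactly n elements from the iterator (stopping early via a sentinel), then emit the remaining tail wholesale with yield from, with no index or branch per emitted element.
import Mathlib
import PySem

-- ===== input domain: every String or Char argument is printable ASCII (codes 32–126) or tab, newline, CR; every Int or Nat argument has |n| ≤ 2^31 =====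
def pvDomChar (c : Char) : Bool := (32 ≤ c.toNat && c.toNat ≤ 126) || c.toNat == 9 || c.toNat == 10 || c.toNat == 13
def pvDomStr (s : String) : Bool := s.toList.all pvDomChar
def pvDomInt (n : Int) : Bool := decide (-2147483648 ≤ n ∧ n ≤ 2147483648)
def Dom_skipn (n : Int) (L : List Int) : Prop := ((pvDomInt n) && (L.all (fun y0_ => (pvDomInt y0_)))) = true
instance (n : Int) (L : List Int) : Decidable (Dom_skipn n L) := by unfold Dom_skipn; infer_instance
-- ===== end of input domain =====

-- B restructures A's single enumerate-with-continue loop into two phases: consume n elements, then emit the tail wholesale; same values everywhere A returns.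

-- ===== PORT A =====
-- A: one enumerate loop; indices < n are skipped via continue, all later elements are yielded.
-- n < 0 raises ValueError (excluded by Pre_skipn); the port returns [] there.
def skipn (n : Int) (L : List Int) : List Int :=
  if 0 ≤ n then
    (PySem.List.enumerate L).foldl (fun acc p => if p.1 < n then acc else acc ++ [p.2]) []
  else []

-- ===== PORT B =====
-- B phase 1: consume exactly n elements, returning early if the iterator ends (sentinel).
def skipnConsume (k : Nat) (it : List Int) : List Int :=
  match k, it with
  | 0, it => it                       -- phase 2: yield from it
  | _ + 1, [] => []                   -- next returned the sentinel: stop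
  | k + 1, _ :: it => skipnConsume k it

-- B: guard, then two phases. n < 0 raises ValueError (excluded by Pre_skipn); [] there.
def skipn_alt (n : Int) (L : List Int) : List Int :=
  if 0 ≤ n then skipnConsume n.toNat L else []

-- ===== PRECONDITION & SPEC =====
-- Pre_ excludes n < 0, where the Python A raises ValueError.
def Pre_skipn (n : Int) (L : List Int) : Prop := 0 ≤ n
instance (n : Int) (L : List Int) : Decidable (Pre_skipn n L) := by unfold Pre_skipn; infer_instance
def pvWitness_skipn : Int × List Int := (2, [1, 2, 3])

def Spec_skipn (n : Int) (L : List Int) (out : List Int) : Prop := out = skipn_alt n L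
instance (n : Int) (L : List Int) (out : List Int) : Decidable (Spec_skipn n L out) := by unfold Spec_skipn; infer_instance

-- ===== CLAIM (what is proved, stated in full; the proofs are below) =====
def Claim_equal_skipn : Prop := ∀ (n : Int) (L : List Int), Dom_skipn n L → Pre_skipn n L → Spec_skipn n L (skipn n L)

-- ===== LEMMAS AND PROOFS =====

-- B's consume-then-tail is List.drop.
theorem skipnConsume_eq_drop (k : Nat) (it : List Int) : skipnConsume k it = it.drop k := by
  induction k generalizing it with
  | zero => simp [skipnConsume]
  | succ k ih =>
    cases it with
    | nil => simp [skipnConsume]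
    | cons x xs => simpa [skipnConsume] using ih xs

-- A's loop from any start index s appends exactly the drop of (n - s) elements.
theorem foldl_enumerate_skip_eq_drop (n : Int) (L : List Int) (s : Int) (acc : List Int) :
    (PySem.List.enumerate L s).foldl (fun acc p => if p.1 < n then acc else acc ++ [p.2]) acc
      = acc ++ L.drop (n - s).toNat := by
  induction L generalizing s acc with
  | nil => simp [PySem.List.enumerate_nil]
  | cons x xs ih =>
    rw [PySem.List.enumerate_cons]
    by_cases h : s < n
    · have h1 : (n - s).toNat = (n - (s + 1)).toNat + 1 := by omega
      simp [h, h1, ih (s + 1)]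
    · have h0 : (n - s).toNat = 0 := by omega
      have h1 : (n - (s + 1)).toNat = 0 := by omega
      simp [h, h0, h1, ih (s + 1)]

-- ===== VERDICT (by name: the statement is the Claim_ definition above) =====
theorem skipn_spec : Claim_equal_skipn := by
  intro n L _ hn
  have hn' : (0:Int) ≤ n := hn
  unfold Spec_skipn skipn skipn_alt
  rw [if_pos hn', if_pos hn', skipnConsume_eq_drop,
    foldl_enumerate_skip_eq_drop n L 0 []]
  simp
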